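-- pv_equiv track=rewrite | github.com/eregs/regulations-parser | regparser/tree/reg_text.py | subjgrp_label
-- ===== SOURCE A (Python) =====
-- import string
--
-- def subjgrp_label(starting_title, letter_list):
--     words = starting_title.split()
--     candidate_title = ""
--     suffixes = [""] + list(string.ascii_lowercase)
--     if len(words) == 1:
--         # E.g. if the word is "Penalties" the progression is:
--         #
--         # Pe    Pe.     Pen     Pen.    Pena    Pena.   <etc.>
--         # Penalties.    Penalties-b.    Penalties-c.    <etc.>
--         word = words[0]
--         terminator = ""
--         suffix_pos = 0
--         pos = min([2, len(word)])
--         while candidate_title == "" or candidate_title in letter_list: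
--             suffix = '-{0}'.format(suffixes[suffix_pos]) if suffix_pos else ''
--             candidate_title = '{0}{1}{2}'.format(word[:pos], terminator,
--                                                  suffix)
--
--             if terminator:
--                 terminator = ""
--                 if pos < len(word):
--                     pos = pos + 1
--                 else:
--                     suffix_pos = suffix_pos + 1
--             else:
--                 terminator = "."
--
--         return candidate_title
--     else:
--         # E.g. if the title is "Change of Ownership" the progression is:
--         #
--         # CoO   C.o.O.  C_o_O   ChofOw  Ch.of.Ow.   <etc.>
--         # ChangeofOwnership-a
--         separators = ("", ".", "_")
--         separator_pos, suffix_pos = 0, 0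
--         num_letters = 1
--         longest = max(len(word) for word in words)
--         while candidate_title == "" or candidate_title in letter_list:
--             sep = separators[separator_pos]
--             suffix = suffixes[suffix_pos]
--             suffix = "-{0}".format(suffix) if suffix else ""
--             suffix = "{0}{1}".format(sep, suffix) if sep == "." else suffix
--             candidate_title = "{0}{1}".format(sep.join(
--                 word[:num_letters] for word in words), suffix)
--             if separator_pos + 1 < len(separators):
--                 separator_pos = separator_pos + 1
--             elif num_letters == longest:
--                 separator_pos = 0
--                 suffix_pos = suffix_pos + 1
--             else:
--                 separator_pos = 0
--                 num_letters = num_letters + 1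
--         return candidate_title
-- ===== SOURCE B (Python) =====
-- import string
--
--
-- def subjgrp_label(starting_title, letter_list):
--     """Enumerate the candidate titles declaratively, then pick the first unused one."""
--     words = starting_title.split()
--     if len(words) == 1:
--         word = words[0]
--
--         def candidates():
--             for pos in range(min(2, len(word)), len(word) + 1):
--                 yield word[:pos]
--                 yield word[:pos] + '.'
--             for c in string.ascii_lowercase:
--                 yield word + '-' + c
--                 yield word + '.' + '-' + c
--     else:
--         longest = max(len(word) for word in words)
--
--         def candidates():
--             for num_letters in range(1, longest + 1):
--                 for sep in ("", ".", "_"):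
--                     base = sep.join(word[:num_letters] for word in words)
--                     yield base + "." if sep == "." else base
--             for c in string.ascii_lowercase:
--                 for sep in ("", ".", "_"):
--                     base = sep.join(words)
--                     yield base + "." + "-" + c if sep == "." else base + "-" + c
--     return next(c for c in candidates() if c not in letter_list)
-- ===== Notes on version B (the rewrite author's own statement) =====
-- stated objective: alternative
-- what changed: A's four-variable while-loop state machine (candidate/terminator/pos/suffix_pos revolving in place) is replaced by a declarative enumeration: build the full candidate-title list with simple nested loops, then return the first candidate not in letter_list.
-- outside the precondition, e.g. on subjgrp_label('ab', ['ab.-z']): A returns 'ab', B returns 'ab'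
import Mathlib
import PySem

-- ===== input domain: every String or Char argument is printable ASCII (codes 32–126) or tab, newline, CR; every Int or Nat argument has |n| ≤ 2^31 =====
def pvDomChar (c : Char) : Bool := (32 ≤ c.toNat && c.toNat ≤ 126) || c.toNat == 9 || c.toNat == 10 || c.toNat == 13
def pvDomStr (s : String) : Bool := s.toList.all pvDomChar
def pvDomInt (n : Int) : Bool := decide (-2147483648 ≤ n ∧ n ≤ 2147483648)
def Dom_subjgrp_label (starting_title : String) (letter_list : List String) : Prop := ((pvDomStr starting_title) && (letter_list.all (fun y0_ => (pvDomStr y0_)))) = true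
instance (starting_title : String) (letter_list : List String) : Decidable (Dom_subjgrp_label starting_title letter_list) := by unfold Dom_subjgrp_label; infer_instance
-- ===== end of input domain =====

-- B replaces A's four-variable while-loop state machine by a declarative enumeration of the
-- candidate titles followed by a single first-unused filter (objective: alternative decomposition).

-- shared literal constants (string.ascii_lowercase, A's suffixes/separators tables)
def pvLetters : List Char := "abcdefghijklmnopqrstuvwxyz".toList
def pvSuffixes : List (List Char) := [] :: pvLetters.map (fun c => [c])
def pvSeps : List (List Char) := [[], ['.'], ['_']]

-- ===== PORT A =====
-- the one-word while loop, state (candidate, terminator, pos, suffix_pos); fuel bounds the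
-- iteration count (ample under Pre_); strings are carried as List Char per the PySem convention
def pvLoopOne (word : List Char) (ll : List (List Char)) :
    Nat → List Char → List Char → Nat → Nat → List Char
  | 0, cand, _, _, _ => cand
  | fuel+1, cand, term, pos, sp =>
    if cand = [] ∨ cand ∈ ll then
      let suffix : List Char := if sp ≠ 0 then '-' :: pvSuffixes.getD sp [] else []
      let cand' := word.take pos ++ term ++ suffix
      if term ≠ [] then
        if pos < word.length then pvLoopOne word ll fuel cand' [] (pos+1) sp
        else pvLoopOne word ll fuel cand' [] pos (sp+1)
      else pvLoopOne word ll fuel cand' ['.'] pos sp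
    else cand

-- the multi-word while loop, state (candidate, separator_pos, num_letters, suffix_pos)
def pvLoopMany (words : List (List Char)) (ll : List (List Char)) (longest : Nat) :
    Nat → List Char → Nat → Nat → Nat → List Char
  | 0, cand, _, _, _ => cand
  | fuel+1, cand, sepPos, numLetters, sp =>
    if cand = [] ∨ cand ∈ ll then
      let sep := pvSeps.getD sepPos []
      let suf0 := pvSuffixes.getD sp []
      let suf1 : List Char := if suf0 ≠ [] then '-' :: suf0 else []
      let suffix := if sep = ['.'] then sep ++ suf1 else suf1
      let cand' := PySem.Chars.join sep (words.map (List.take numLetters)) ++ suffix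
      if sepPos + 1 < 3 then pvLoopMany words ll longest fuel cand' (sepPos+1) numLetters sp
      else if numLetters = longest then pvLoopMany words ll longest fuel cand' 0 numLetters (sp+1)
      else pvLoopMany words ll longest fuel cand' 0 (numLetters+1) sp
    else cand

def subjgrp_label (starting_title : String) (letter_list : List String) : String :=
  let words := PySem.Chars.split₀ starting_title.toList
  let ll := letter_list.map String.toList
  if words.length = 1 then
    let word := words.headD []
    String.ofList (pvLoopOne word ll (2 * word.length + 60) [] [] (min 2 word.length) 0)
  else
    let longest := ((words.map List.length).max?).getD 0
    String.ofList (pvLoopMany words ll longest (3 * longest + 90) [] 0 1 0)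

-- ===== PORT B =====
-- Source B: build the full candidate list by comprehensions, then take the first not in letter_list
def pvCandsOne (word : List Char) : List (List Char) :=
  (List.range' (min 2 word.length) (word.length + 1 - min 2 word.length)).flatMap
    (fun pos => [word.take pos, word.take pos ++ ['.']])
  ++ pvLetters.flatMap (fun c => [word ++ '-' :: [c], word ++ '.' :: '-' :: [c]])

def pvCandsMany (words : List (List Char)) (longest : Nat) : List (List Char) :=
  (List.range' 1 longest).flatMap (fun nl =>
    pvSeps.map (fun sep =>
      PySem.Chars.join sep (words.map (List.take nl)) ++ (if sep = ['.'] then ['.'] else [])))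
  ++ pvLetters.flatMap (fun c =>
    pvSeps.map (fun sep =>
      PySem.Chars.join sep words ++ (if sep = ['.'] then '.' :: '-' :: [c] else '-' :: [c])))

def subjgrp_label_alt (starting_title : String) (letter_list : List String) : String :=
  let words := PySem.Chars.split₀ starting_title.toList
  let ll := letter_list.map String.toList
  let cands := if words.length = 1 then pvCandsOne (words.headD [])
               else pvCandsMany words (((words.map List.length).max?).getD 0)
  String.ofList ((cands.find? (fun c => !(ll.contains c))).getD [])

-- ===== PRECONDITION & SPEC =====
-- Pre_ excludes whitespace-only titles (A raises ValueError on max() of no words) and inputs whose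
-- letter_list already contains the final '-z' candidate — a sufficient, slightly conservative guard
-- against A exhausting its 27 suffixes and raising IndexError.
def Pre_subjgrp_label (starting_title : String) (letter_list : List String) : Prop :=
  let words := PySem.Chars.split₀ starting_title.toList
  words ≠ [] ∧
  (if words.length = 1 then words.headD [] ++ ('.' :: '-' :: ['z']) ∉ letter_list.map String.toList
   else PySem.Chars.join ['_'] words ++ ('-' :: ['z']) ∉ letter_list.map String.toList)
instance (starting_title : String) (letter_list : List String) : Decidable (Pre_subjgrp_label starting_title letter_list) := by unfold Pre_subjgrp_label; infer_instance

def pvWitness_subjgrp_label : String × List String := ("Penalties", ["Pe", "Pe."])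

def Spec_subjgrp_label (starting_title : String) (letter_list : List String) (out : String) : Prop := out = subjgrp_label_alt starting_title letter_list
instance (starting_title : String) (letter_list : List String) (out : String) : Decidable (Spec_subjgrp_label starting_title letter_list out) := by unfold Spec_subjgrp_label; infer_instance

-- ===== CLAIM (what is proved, stated in full; the proofs are below) =====
def Claim_equal_subjgrp_label : Prop := ∀ (starting_title : String) (letter_list : List String), Dom_subjgrp_label starting_title letter_list → Pre_subjgrp_label starting_title letter_list → Spec_subjgrp_label starting_title letter_list (subjgrp_label starting_title letter_list)

-- ===== LEMMAS AND PROOFS =====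

-- pure mirror of A's one-word loop: the list of candidates it generates from a given state
def pvGenOne (word : List Char) : Nat → List Char → Nat → Nat → List (List Char)
  | 0, _, _, _ => []
  | fuel+1, term, pos, sp =>
    let suffix : List Char := if sp ≠ 0 then '-' :: pvSuffixes.getD sp [] else []
    let cand' := word.take pos ++ term ++ suffix
    if term ≠ [] then
      if pos < word.length then cand' :: pvGenOne word fuel [] (pos+1) sp
      else cand' :: pvGenOne word fuel [] pos (sp+1)
    else cand' :: pvGenOne word fuel ['.'] pos sp

def pvGenMany (words : List (List Char)) (longest : Nat) : Nat → Nat → Nat → Nat → List (List Char)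
  | 0, _, _, _ => []
  | fuel+1, sepPos, numLetters, sp =>
    let sep := pvSeps.getD sepPos []
    let suf0 := pvSuffixes.getD sp []
    let suf1 : List Char := if suf0 ≠ [] then '-' :: suf0 else []
    let suffix := if sep = ['.'] then sep ++ suf1 else suf1
    let cand' := PySem.Chars.join sep (words.map (List.take numLetters)) ++ suffix
    if sepPos + 1 < 3 then cand' :: pvGenMany words longest fuel (sepPos+1) numLetters sp
    else if numLetters = longest then cand' :: pvGenMany words longest fuel 0 numLetters (sp+1)
    else cand' :: pvGenMany words longest fuel 0 (numLetters+1) sp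

-- first candidate that is nonempty and unused, with a running default (mirrors the loop's check)
def pvFindCD (ll : List (List Char)) : List (List Char) → List Char → List Char
  | [], d => d
  | c :: rest, _ => if c = [] ∨ c ∈ ll then pvFindCD ll rest c else c

theorem pvLoopOne_pass (word : List Char) (ll : List (List Char)) (fuel : Nat)
    (cand term : List Char) (pos sp : Nat) (h : ¬ (cand = [] ∨ cand ∈ ll)) :
    pvLoopOne word ll fuel cand term pos sp = cand := by
  cases fuel <;> simp [pvLoopOne, h]

theorem pvLoopMany_pass (words : List (List Char)) (ll : List (List Char)) (longest fuel : Nat)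
    (cand : List Char) (sepPos numLetters sp : Nat) (h : ¬ (cand = [] ∨ cand ∈ ll)) :
    pvLoopMany words ll longest fuel cand sepPos numLetters sp = cand := by
  cases fuel <;> simp [pvLoopMany, h]

theorem pvSplitgo_ne_nil : ∀ (s cur : List Char) (acc : List (List Char)), (∀ w ∈ acc, w ≠ []) →
    ∀ w ∈ PySem.Chars.split₀.go s cur acc, w ≠ [] := by
  intro s
  induction s with
  | nil =>
    intro cur acc h w hw
    simp only [PySem.Chars.split₀.go] at hw
    split at hw
    · simp at hw; exact h w hw
    · rename_i hcur
      simp at hw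
      rcases hw with hw | hw
      · exact h w hw
      · subst hw; simp [List.isEmpty_iff] at hcur; simp [hcur]
  | cons c rest ih =>
    intro cur acc h w hw
    simp only [PySem.Chars.split₀.go] at hw
    split at hw
    · split at hw
      · exact ih [] acc h w hw
      · rename_i hcur
        refine ih [] _ ?_ w hw
        intro v hv
        rcases List.mem_cons.1 hv with hv | hv
        · subst hv; simp [List.isEmpty_iff] at hcur; simp [hcur]
        · exact h v hv
    · exact ih (c :: cur) acc h w hw

theorem pv_split₀_ne_nil (s : List Char) : ∀ w ∈ PySem.Chars.split₀ s, w ≠ [] := by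
  intro w hw
  exact pvSplitgo_ne_nil s [] [] (by simp) w hw

theorem DRIVE1 (word : List Char) (ll : List (List Char)) :
    ∀ (fuel : Nat) (cand term : List Char) (pos sp : Nat), (cand = [] ∨ cand ∈ ll) →
    pvLoopOne word ll fuel cand term pos sp = pvFindCD ll (pvGenOne word fuel term pos sp) cand := by
  intro fuel
  induction fuel with
  | zero => intro cand term pos sp h; simp [pvLoopOne, pvGenOne, pvFindCD]
  | succ n ih =>
    intro cand term pos sp h
    simp only [pvLoopOne, pvGenOne, if_pos h]
    by_cases ht : term ≠ []
    · by_cases hp : pos < word.length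
      · simp only [if_pos ht, if_pos hp, pvFindCD]
        by_cases hc : (word.take pos ++ term ++ (if sp ≠ 0 then '-' :: pvSuffixes.getD sp [] else [])) = [] ∨ (word.take pos ++ term ++ (if sp ≠ 0 then '-' :: pvSuffixes.getD sp [] else [])) ∈ ll
        · rw [if_pos hc]; exact ih _ _ _ _ hc
        · rw [if_neg hc]; exact pvLoopOne_pass _ _ _ _ _ _ _ hc
      · simp only [if_pos ht, if_neg hp, pvFindCD]
        by_cases hc : (word.take pos ++ term ++ (if sp ≠ 0 then '-' :: pvSuffixes.getD sp [] else [])) = [] ∨ (word.take pos ++ term ++ (if sp ≠ 0 then '-' :: pvSuffixes.getD sp [] else [])) ∈ ll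
        · rw [if_pos hc]; exact ih _ _ _ _ hc
        · rw [if_neg hc]; exact pvLoopOne_pass _ _ _ _ _ _ _ hc
    · simp only [if_neg ht, pvFindCD]
      by_cases hc : (word.take pos ++ term ++ (if sp ≠ 0 then '-' :: pvSuffixes.getD sp [] else [])) = [] ∨ (word.take pos ++ term ++ (if sp ≠ 0 then '-' :: pvSuffixes.getD sp [] else [])) ∈ ll
      · rw [if_pos hc]; exact ih _ _ _ _ hc
      · rw [if_neg hc]; exact pvLoopOne_pass _ _ _ _ _ _ _ hc
theorem DRIVE2 (words : List (List Char)) (ll : List (List Char)) (longest : Nat) :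
    ∀ (fuel : Nat) (cand : List Char) (sepPos numLetters sp : Nat), (cand = [] ∨ cand ∈ ll) →
    pvLoopMany words ll longest fuel cand sepPos numLetters sp
      = pvFindCD ll (pvGenMany words longest fuel sepPos numLetters sp) cand := by
  intro fuel
  induction fuel with
  | zero => intro cand sepPos numLetters sp h; simp [pvLoopMany, pvGenMany, pvFindCD]
  | succ n ih =>
    intro cand sepPos numLetters sp h
    have key : ∀ (c' : List Char) (a b c : Nat),
        pvLoopMany words ll longest n c' a b c
          = pvFindCD ll (c' :: pvGenMany words longest n a b c) cand := by
      intro c' a b c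
      simp only [pvFindCD]
      by_cases hc : c' = [] ∨ c' ∈ ll
      · rw [if_pos hc]; exact ih _ _ _ _ hc
      · rw [if_neg hc]; exact pvLoopMany_pass _ _ _ _ _ _ _ _ hc
    simp only [pvLoopMany, pvGenMany, if_pos h]
    split_ifs <;> exact key _ _ _ _

theorem FCDapp (ll : List (List Char)) (l1 l2 : List (List Char)) (c : List Char)
    (hc : c ∈ l1) (hne : c ≠ []) (hnin : c ∉ ll) :
    ∀ d, pvFindCD ll (l1 ++ l2) d = pvFindCD ll l1 d := by
  induction l1 with
  | nil => cases hc
  | cons a r ihr =>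
    intro d
    simp only [List.cons_append, pvFindCD]
    by_cases ha : a = [] ∨ a ∈ ll
    · rw [if_pos ha, if_pos ha]
      have hcr : c ∈ r := by
        rcases List.mem_cons.1 hc with h | h
        · subst h
          rcases ha with h1 | h1
          · exact absurd h1 hne
          · exact absurd h1 hnin
        · exact h
      exact ihr hcr _
    · rw [if_neg ha, if_neg ha]

theorem FCDfind (ll : List (List Char)) :
    ∀ (cands : List (List Char)), (∀ c ∈ cands, c ≠ []) →
    ∀ (c : List Char), c ∈ cands → c ∉ ll →
    ∀ d d', pvFindCD ll cands d = ((cands.find? (fun c => !(ll.contains c))).getD d') := by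
  intro cands
  induction cands with
  | nil => intro _ c hc; cases hc
  | cons a r ihr =>
    intro hne c hc hnin d d'
    simp only [pvFindCD, List.find?]
    by_cases ha : a ∈ ll
    · have hfail : a = [] ∨ a ∈ ll := Or.inr ha
      rw [if_pos hfail]
      have hpr : (!(ll.contains a)) = false := by simp [ha]
      rw [hpr]
      have hcr : c ∈ r := by
        rcases List.mem_cons.1 hc with h | h
        · subst h; exact absurd ha hnin
        · exact h
      exact ihr (fun x hx => hne x (List.mem_cons_of_mem _ hx)) c hcr hnin _ _
    · have hanil : a ≠ [] := hne a (List.mem_cons_self ..)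
      have hfail : ¬ (a = [] ∨ a ∈ ll) := by
        rintro (h | h)
        · exact hanil h
        · exact ha h
      rw [if_neg hfail]
      have hpr : (!(ll.contains a)) = true := by simp [ha]
      rw [hpr]
      simp
theorem genOne_pos (word : List Char) :
    ∀ (k pos f : Nat), pos + k = word.length →
    pvGenOne word (2*k + 2 + f) [] pos 0
      = (List.range' pos (k+1)).flatMap (fun p => [word.take p, word.take p ++ ['.']])
        ++ pvGenOne word f [] word.length 1 := by
  intro k
  induction k with
  | zero =>
    intro pos f h
    simp only [Nat.add_zero] at h
    subst h
    have h2 : 2*0 + 2 + f = f + 1 + 1 := by omega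
    rw [h2]
    simp [pvGenOne, List.range']
  | succ n ih =>
    intro pos f h
    have hlt : pos < word.length := by omega
    have h2 : 2*(n+1) + 2 + f = (2*n + 2 + f) + 1 + 1 := by omega
    rw [h2]
    have hr : List.range' pos (n+1+1) = pos :: List.range' (pos+1) (n+1) := List.range'_succ ..
    rw [hr]
    simp only [pvGenOne, List.flatMap_cons]
    simp [hlt, ih (pos+1) f (by omega)]

theorem genOne_suf (word : List Char) :
    ∀ (sufs : List (List Char)) (sp f : Nat), pvSuffixes.drop sp = sufs → 1 ≤ sp →
    pvGenOne word (2*sufs.length + f) [] word.length sp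
      = sufs.flatMap (fun s => [word ++ '-' :: s, word ++ '.' :: '-' :: s])
        ++ pvGenOne word f [] word.length (sp + sufs.length) := by
  intro sufs
  induction sufs with
  | nil => intro sp f _ _; simp
  | cons s rest ih =>
    intro sp f hdrop hsp
    have hget : pvSuffixes.getD sp [] = s := by
      rw [List.getD_eq_getElem?_getD]
      have h0 : pvSuffixes[sp + 0]? = some s := by
        rw [← List.getElem?_drop, hdrop]; rfl
      simp only [Nat.add_zero] at h0
      rw [h0]; rfl
    have hdrop2 : pvSuffixes.drop (sp+1) = rest := by
      rw [← List.tail_drop, hdrop]; rfl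
    have h2 : 2*(s :: rest).length + f = (2*rest.length + f) + 1 + 1 := by simp; omega
    rw [h2]
    have hsp0 : sp ≠ 0 := by omega
    have hstep := ih (sp+1) f hdrop2 (by omega)
    simp only [pvGenOne, hget]
    simp only [ne_eq, not_true_eq_false, ite_false,
      List.take_length, List.append_nil, lt_irrefl, List.length_cons]
    rw [hstep, show sp + (rest.length + 1) = sp + 1 + rest.length from by omega]
    simp [List.append_assoc]
    exact hsp0
theorem pvGenOne_structure' (word : List Char) (f : Nat) (pos0 : Nat)
    (hpos : pos0 ≤ word.length) :
    pvGenOne word (2 * (word.length - pos0) + 54 + f) [] pos0 0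
      = (List.range' pos0 (word.length + 1 - pos0)).flatMap
          (fun p => [word.take p, word.take p ++ ['.']])
        ++ pvLetters.flatMap (fun c => [word ++ '-' :: [c], word ++ '.' :: '-' :: [c]])
        ++ pvGenOne word f [] word.length 27 := by
  have hdrop : pvSuffixes.drop 1 = pvLetters.map (fun c => [c]) := rfl
  have hlen : (pvLetters.map (fun c => [c])).length = 26 := by decide
  have h1 : 2 * (word.length - pos0) + 54 + f = 2*(word.length - pos0) + 2 + (2*26 + f) := by omega
  rw [h1, genOne_pos word (word.length - pos0) pos0 (2*26+f) (by omega)]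
  have h2 : (2:Nat)*26 + f = 2 * (pvLetters.map (fun c => [c])).length + f := by rw [hlen]
  rw [h2, genOne_suf word (pvLetters.map (fun c => [c])) 1 f hdrop (by omega)]
  rw [show word.length + 1 - pos0 = (word.length - pos0) + 1 from by omega]
  rw [List.flatMap_map, hlen, List.append_assoc]
theorem genMany_nl (words : List (List Char)) (longest : Nat) :
    ∀ (k nl f : Nat), nl + k = longest →
    pvGenMany words longest (3*k + 3 + f) 0 nl 0
      = (List.range' nl (k+1)).flatMap (fun n =>
          pvSeps.map (fun sep =>
            PySem.Chars.join sep (words.map (List.take n)) ++ (if sep = ['.'] then ['.'] else [])))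
        ++ pvGenMany words longest f 0 longest 1 := by
  intro k
  induction k with
  | zero =>
    intro nl f h
    simp only [Nat.add_zero] at h
    subst h
    rw [show 3*0 + 3 + f = f + 1 + 1 + 1 from by omega]
    simp [pvGenMany, List.range', pvSeps, pvSuffixes]
  | succ n ih =>
    intro nl f h
    have hne : nl ≠ longest := by omega
    rw [show 3*(n+1) + 3 + f = (3*n + 3 + f) + 1 + 1 + 1 from by omega]
    rw [List.range'_succ]
    simp only [List.flatMap_cons]
    simp [pvGenMany, pvSeps, pvSuffixes, hne, ih (nl+1) f (by omega)]

theorem genMany_suf (words : List (List Char)) (longest : Nat) :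
    ∀ (sufs : List (List Char)) (sp f : Nat), pvSuffixes.drop sp = sufs → 1 ≤ sp →
    pvGenMany words longest (3*sufs.length + f) 0 longest sp
      = sufs.flatMap (fun s =>
          pvSeps.map (fun sep =>
            PySem.Chars.join sep (words.map (List.take longest))
              ++ (if sep = ['.'] then '.' :: '-' :: s else '-' :: s)))
        ++ pvGenMany words longest f 0 longest (sp + sufs.length) := by
  intro sufs
  induction sufs with
  | nil => intro sp f _ _; simp
  | cons s rest ih =>
    intro sp f hdrop hsp
    have hgetE : pvSuffixes[sp]? = some s := by
      have h0 : pvSuffixes[sp + 0]? = some s := by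
        rw [← List.getElem?_drop, hdrop]; rfl
      simpa using h0
    have hget : pvSuffixes.getD sp [] = s := by
      rw [List.getD_eq_getElem?_getD, hgetE]; rfl
    have hdrop2 : pvSuffixes.drop (sp+1) = rest := by
      rw [← List.tail_drop, hdrop]; rfl
    have hsne : s ≠ [] := by
      have hmem : s ∈ pvSuffixes.drop 1 := by
        have h2 : (pvSuffixes.drop 1).drop (sp - 1) = s :: rest := by
          rw [List.drop_drop, show 1 + (sp - 1) = sp from by omega, hdrop]
        have h3 : s ∈ (pvSuffixes.drop 1).drop (sp - 1) := by
          rw [h2]; exact List.mem_cons_self ..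
        exact List.mem_of_mem_drop h3
      rw [show pvSuffixes.drop 1 = pvLetters.map (fun c => [c]) from rfl] at hmem
      obtain ⟨c, _, hc⟩ := List.mem_map.1 hmem
      simp [← hc]
    rw [show 3*(s :: rest).length + f = (3*rest.length + f) + 1 + 1 + 1 from by simp; omega]
    have hstep := ih (sp+1) f hdrop2 (by omega)
    simp [pvGenMany, pvSeps, hgetE, hsne, hstep,
      show sp + (rest.length + 1) = sp + 1 + rest.length from by omega]
theorem pvGenMany_structure' (words : List (List Char)) (longest f : Nat) (h1 : 1 ≤ longest) :
    pvGenMany words longest (3*longest + 78 + f) 0 1 0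
      = (List.range' 1 longest).flatMap (fun nl =>
          pvSeps.map (fun sep =>
            PySem.Chars.join sep (words.map (List.take nl)) ++ (if sep = ['.'] then ['.'] else [])))
        ++ pvLetters.flatMap (fun c =>
          pvSeps.map (fun sep =>
            PySem.Chars.join sep (words.map (List.take longest))
              ++ (if sep = ['.'] then '.' :: '-' :: [c] else '-' :: [c])))
        ++ pvGenMany words longest f 0 longest 27 := by
  have hdrop : pvSuffixes.drop 1 = pvLetters.map (fun c => [c]) := rfl
  have hlen : (pvLetters.map (fun c => [c])).length = 26 := by decide
  rw [show 3*longest + 78 + f = 3*(longest - 1) + 3 + (3*26 + f) from by omega,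
    genMany_nl words longest (longest - 1) 1 (3*26+f) (by omega)]
  rw [show (3:Nat)*26 + f = 3 * (pvLetters.map (fun c => [c])).length + f from by rw [hlen],
    genMany_suf words longest (pvLetters.map (fun c => [c])) 1 f hdrop (by omega)]
  rw [show longest - 1 + 1 = longest from by omega, List.flatMap_map, hlen, List.append_assoc]

theorem pvCandsOne_ne_nil (word : List Char) (hw : word ≠ []) :
    ∀ c ∈ pvCandsOne word, c ≠ [] := by
  intro c hc
  rcases List.mem_append.1 hc with h | h
  · obtain ⟨p, hp, hcp⟩ := List.mem_flatMap.1 h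
    have hp1 : 1 ≤ p := by
      have := List.left_le_of_mem_range' hp
      have hw1 : 1 ≤ word.length := by
        cases word
        · exact absurd rfl hw
        · simp
      omega
    have htk : word.take p ≠ [] := by
      intro hnil
      rcases List.take_eq_nil_iff.mp hnil with h0 | h0
      · omega
      · exact hw h0
    simp only [List.mem_cons, List.not_mem_nil, or_false] at hcp
    rcases hcp with h2 | h2
    · subst h2; exact htk
    · subst h2; exact List.append_ne_nil_of_left_ne_nil htk _
  · obtain ⟨a, _, hca⟩ := List.mem_flatMap.1 h
    simp only [List.mem_cons, List.not_mem_nil, or_false] at hca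
    rcases hca with h2 | h2
    · subst h2; exact List.append_ne_nil_of_left_ne_nil hw _
    · subst h2; exact List.append_ne_nil_of_left_ne_nil hw _

theorem pvCandsMany_ne_nil (w1 w2 : List Char) (ws : List (List Char)) (longest : Nat)
    (hw1 : w1 ≠ []) : ∀ c ∈ pvCandsMany (w1 :: w2 :: ws) longest, c ≠ [] := by
  intro c hc
  have hjoin : ∀ (sep : List Char) (nl : Nat), 1 ≤ nl →
      PySem.Chars.join sep ((w1 :: w2 :: ws).map (List.take nl)) ≠ [] := by
    intro sep nl hnl
    simp only [List.map_cons]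
    rw [PySem.Chars.join_cons_cons]
    refine List.append_ne_nil_of_left_ne_nil ?_ _
    refine List.append_ne_nil_of_left_ne_nil ?_ _
    intro hnil
    rcases List.take_eq_nil_iff.mp hnil with h0 | h0
    · omega
    · exact hw1 h0
  rcases List.mem_append.1 hc with h | h
  · obtain ⟨nl, hnl, hcn⟩ := List.mem_flatMap.1 h
    have hnl1 : 1 ≤ nl := List.left_le_of_mem_range' hnl
    obtain ⟨sep, _, hcs⟩ := List.mem_map.1 hcn
    subst hcs
    exact List.append_ne_nil_of_left_ne_nil (hjoin sep nl hnl1) _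
  · obtain ⟨a, _, hcn⟩ := List.mem_flatMap.1 h
    obtain ⟨sep, _, hcs⟩ := List.mem_map.1 hcn
    subst hcs
    split <;> simp
theorem glueOne (w : List Char) (llc : List (List Char)) (hwne : w ≠ [])
    (hz : w ++ ('.' :: '-' :: ['z']) ∉ llc) :
    pvLoopOne w llc (2 * w.length + 60) [] [] (min 2 w.length) 0
      = ((pvCandsOne w).find? (fun c => !(llc.contains c))).getD [] := by
  have hle : min 2 w.length ≤ w.length := Nat.min_le_right _ _
  rw [DRIVE1 w llc _ [] [] _ 0 (Or.inl rfl)]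
  rw [show 2*w.length + 60 = 2*(w.length - min 2 w.length) + 54 + (2*(min 2 w.length)+6) from by omega]
  rw [pvGenOne_structure' w _ (min 2 w.length) hle]
  have hzmem : w ++ ('.' :: '-' :: ['z']) ∈ pvCandsOne w := by
    unfold pvCandsOne
    refine List.mem_append.2 (Or.inr ?_)
    refine List.mem_flatMap.2 ⟨'z', by decide, ?_⟩
    simp
  rw [show ((List.range' (min 2 w.length) (w.length + 1 - min 2 w.length)).flatMap
        (fun p => [w.take p, w.take p ++ ['.']])
      ++ pvLetters.flatMap (fun c => [w ++ '-' :: [c], w ++ '.' :: '-' :: [c]]))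
      = pvCandsOne w from rfl]
  rw [FCDapp llc _ _ _ hzmem (by simp) hz []]
  exact FCDfind llc (pvCandsOne w) (pvCandsOne_ne_nil w hwne) _ hzmem hz [] []

theorem glueMany (w1 w2 : List Char) (ws : List (List Char)) (llc : List (List Char))
    (hw1 : w1 ≠ [])
    (hz : PySem.Chars.join ['_'] (w1 :: w2 :: ws) ++ ('-' :: ['z']) ∉ llc) :
    pvLoopMany (w1 :: w2 :: ws) llc ((((w1 :: w2 :: ws).map List.length).max?).getD 0)
        (3 * ((((w1 :: w2 :: ws).map List.length).max?).getD 0) + 90) [] 0 1 0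
      = ((pvCandsMany (w1 :: w2 :: ws) ((((w1 :: w2 :: ws).map List.length).max?).getD 0)).find?
          (fun c => !(llc.contains c))).getD [] := by
  set L := (((w1 :: w2 :: ws).map List.length).max?).getD 0 with hL
  have hbound : ∀ w ∈ (w1 :: w2 :: ws), w.length ≤ L :=
    fun w hw => List.le_max?_getD_of_mem (List.mem_map_of_mem hw)
  have h1 : 1 ≤ L := by
    have := hbound w1 (List.mem_cons_self ..)
    have : 1 ≤ w1.length := by
      cases w1
      · exact absurd rfl hw1
      · simp
    omega
  rw [DRIVE2 _ llc L _ [] 0 1 0 (Or.inl rfl)]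
  rw [show 3*L + 90 = 3*L + 78 + 12 from by omega]
  rw [pvGenMany_structure' (w1 :: w2 :: ws) L 12 h1]
  have htake : (w1 :: w2 :: ws).map (List.take L) = (w1 :: w2 :: ws) := by
    have h := fun w hw => List.take_of_length_le (hbound w hw)
    rw [List.map_congr_left h, List.map_id']
  rw [htake]
  have hzmem : PySem.Chars.join ['_'] (w1 :: w2 :: ws) ++ ('-' :: ['z'])
      ∈ pvCandsMany (w1 :: w2 :: ws) L := by
    unfold pvCandsMany
    refine List.mem_append.2 (Or.inr ?_)
    refine List.mem_flatMap.2 ⟨'z', by decide, ?_⟩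
    refine List.mem_map.2 ⟨['_'], by decide, ?_⟩
    simp
  rw [show ((List.range' 1 L).flatMap (fun nl =>
        pvSeps.map (fun sep =>
          PySem.Chars.join sep ((w1 :: w2 :: ws).map (List.take nl)) ++ (if sep = ['.'] then ['.'] else [])))
      ++ pvLetters.flatMap (fun c =>
        pvSeps.map (fun sep =>
          PySem.Chars.join sep (w1 :: w2 :: ws) ++ (if sep = ['.'] then '.' :: '-' :: [c] else '-' :: [c]))))
      = pvCandsMany (w1 :: w2 :: ws) L from rfl]
  rw [FCDapp llc _ _ _ hzmem (by simp) hz []]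
  exact FCDfind llc _ (pvCandsMany_ne_nil w1 w2 ws L hw1) _ hzmem hz [] []


-- ===== VERDICT (by name: the statement is the Claim_ definition above) =====
theorem subjgrp_label_spec : Claim_equal_subjgrp_label := by
  intro t ll _ hpre
  simp only [Pre_subjgrp_label] at hpre
  obtain ⟨hwne, hz⟩ := hpre
  unfold Spec_subjgrp_label subjgrp_label subjgrp_label_alt
  have hnn := pv_split₀_ne_nil t.toList
  by_cases hlen : (PySem.Chars.split₀ t.toList).length = 1
  · obtain ⟨w, hw⟩ := List.length_eq_one_iff.mp hlen
    rw [if_pos hlen] at hz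
    rw [hw] at hz ⊢
    simp only [List.headD_cons] at hz ⊢
    simp only [List.length_cons, List.length_nil]
    exact congrArg String.ofList
      (glueOne w (ll.map String.toList) (hnn w (by rw [hw]; exact List.mem_cons_self ..)) hz)
  · rw [if_neg hlen] at hz
    obtain ⟨W, hW⟩ : ∃ W, PySem.Chars.split₀ t.toList = W := ⟨_, rfl⟩
    rw [hW] at hz hwne hlen hnn ⊢
    match W, hwne with
    | [w1], _ => exact absurd rfl hlen
    | w1 :: w2 :: ws, _ =>
      simp only [if_neg hlen]
      exact congrArg String.ofList
        (glueMany w1 w2 ws (ll.map String.toList) (hnn w1 (List.mem_cons_self ..)) hz)
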